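-- pv_equiv track=rewrite | github.com/onewns/TIL | algorithm/etc/BOJ20310(del).py | thanos
-- ===== SOURCE A (Python) =====
-- def thanos(arr):
--     num = arr
--     one, zero = num.count(1)//2, num.count(0)//2
--     i = 0
--     while one:
--         if num[i]:
--             del num[i]
--             one -= 1
--         else:
--             i += 1
--     i = len(num) - 1
--     while zero:
--         if not num[i]:
--             del num[i]
--             zero -= 1
--         i -= 1
--     return num
-- ===== SOURCE B (Python) =====
-- def thanos(arr):
--     ones = arr.count(1) // 2
--     zeros = arr.count(0) // 2
--     kept = []
--     for x in arr:
--         if x and ones: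
--             ones -= 1
--         else:
--             kept.append(x)
--     res = []
--     for x in reversed(kept):
--         if x == 0 and zeros:
--             zeros -= 1
--         else:
--             res.append(x)
--     res.reverse()
--     arr[:] = res
--     return arr
-- ===== Notes on version B (the rewrite author's own statement) =====
-- stated objective: alternative
-- what changed: A repeatedly deletes elements of the list in place (each del shifts the tail, quadratic in the worst case when many 1s/0s are present); B counts once and then does two linear skip passes (forward pass skipping the first count(1)//2 truthy elements, backward pass skipping the last count(0)//2 zeros) building a fresh result list.
import Mathlib
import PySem

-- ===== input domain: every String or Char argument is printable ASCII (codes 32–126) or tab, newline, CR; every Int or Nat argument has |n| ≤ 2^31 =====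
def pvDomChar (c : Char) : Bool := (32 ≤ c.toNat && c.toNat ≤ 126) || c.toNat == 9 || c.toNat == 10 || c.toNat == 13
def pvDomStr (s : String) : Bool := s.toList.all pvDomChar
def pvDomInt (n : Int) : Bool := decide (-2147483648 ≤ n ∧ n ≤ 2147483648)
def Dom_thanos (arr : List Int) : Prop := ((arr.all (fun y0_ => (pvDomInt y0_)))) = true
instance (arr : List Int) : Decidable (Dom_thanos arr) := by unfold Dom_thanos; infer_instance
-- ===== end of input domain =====

-- B replaces A's in-place deletions (each del shifts the tail) by one count and two linear skip passes.
-- Both Pythons mutate the argument list in place identically (A by del, B by arr[:] = res); the theorems are about the return value.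

-- ===== PORT A =====

-- first while loop of A; `fuel` only makes the recursion structural (never exhausted on A's executions)
def thanosLoop1 (fuel : Nat) (one i : Nat) (num : List Int) : List Int :=
  match fuel with
  | 0 => num
  | fuel + 1 =>
    if one = 0 then num
    else
      match PySem.List.pyGet? num (i : Int) with
      | none => num
      | some v =>
        if v ≠ 0 then thanosLoop1 fuel (one - 1) i (num.eraseIdx i)   -- del num[i]
        else thanosLoop1 fuel one (i + 1) num

-- second while loop of A (i runs downward; del num[i] normalises a negative index like Python)
def thanosLoop2 (fuel : Nat) (zer : Nat) (i : Int) (num : List Int) : List Int :=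
  match fuel with
  | 0 => num
  | fuel + 1 =>
    if zer = 0 then num
    else
      match PySem.List.pyGet? num i with
      | none => num
      | some v =>
        if v = 0 then
          thanosLoop2 fuel (zer - 1) (i - 1)
            (num.eraseIdx (if i < 0 then i + (num.length : Int) else i).toNat)   -- del num[i]
        else thanosLoop2 fuel zer (i - 1) num


def thanos (arr : List Int) : List Int :=
  let num := arr
  let one := PySem.List.count num 1 / 2     -- num.count(1)//2 (count is a Nat, // 2 is its floor division)
  let zer := PySem.List.count num 0 / 2     -- num.count(0)//2
  let num2 := thanosLoop1 (one + num.length) one 0 num      -- i = 0; fuel bounds the loop's step count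
  thanosLoop2 (zer + num2.length) zer ((num2.length : Int) - 1) num2   -- i = len(num) - 1

-- ===== PORT B =====
-- forward pass: for x in arr: if x and ones: ones -= 1 else: kept.append(x)
-- backward pass: for x in reversed(kept): if x == 0 and zeros: zeros -= 1 else: res.append(x); then res.reverse()
def thanos_alt (arr : List Int) : List Int :=
  let ones := PySem.List.count arr 1 / 2
  let zeros := PySem.List.count arr 0 / 2
  let s1 := arr.foldl
    (fun (st : Nat × List Int) x =>
      if x ≠ 0 ∧ st.1 ≠ 0 then (st.1 - 1, st.2) else (st.1, st.2 ++ [x]))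
    (ones, [])
  let s2 := s1.2.reverse.foldl
    (fun (st : Nat × List Int) x =>
      if x = 0 ∧ st.1 ≠ 0 then (st.1 - 1, st.2) else (st.1, st.2 ++ [x]))
    (zeros, [])
  s2.2.reverse

-- ===== PRECONDITION & SPEC =====
def Spec_thanos (arr : List Int) (out : List Int) : Prop := out = thanos_alt arr
instance (arr : List Int) (out : List Int) : Decidable (Spec_thanos arr out) := by unfold Spec_thanos; infer_instance

-- ===== CLAIM (what is proved, stated in full; the proofs are below) =====
def Claim_equal_thanos : Prop := ∀ (arr : List Int), Dom_thanos arr → Spec_thanos arr (thanos arr)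

-- ===== LEMMAS AND PROOFS =====

-- drop the first k truthy (nonzero) elements, keep everything else; drop the first k zeros, keep everything else
def skipOnes : Nat → List Int → List Int
  | 0, l => l
  | _ + 1, [] => []
  | k + 1, x :: xs => if x ≠ 0 then skipOnes k xs else x :: skipOnes (k + 1) xs

def skipZeros : Nat → List Int → List Int
  | 0, l => l
  | _ + 1, [] => []
  | k + 1, x :: xs => if x = 0 then skipZeros k xs else x :: skipZeros (k + 1) xs


theorem fold1_eq (l : List Int) : ∀ (k : Nat) (acc : List Int),
    (l.foldl (fun (st : Nat × List Int) x =>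
        if x ≠ 0 ∧ st.1 ≠ 0 then (st.1 - 1, st.2) else (st.1, st.2 ++ [x])) (k, acc)).2
      = acc ++ skipOnes k l := by
  induction l with
  | nil => intro k acc; cases k <;> simp [skipOnes]
  | cons x xs ih =>
    intro k acc
    cases k with
    | zero => simp [List.foldl_cons, skipOnes, ih]
    | succ k =>
      by_cases hx : x = 0 <;> simp [List.foldl_cons, skipOnes, hx, ih]

theorem fold2_eq (l : List Int) : ∀ (k : Nat) (acc : List Int),
    (l.foldl (fun (st : Nat × List Int) x =>
        if x = 0 ∧ st.1 ≠ 0 then (st.1 - 1, st.2) else (st.1, st.2 ++ [x])) (k, acc)).2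
      = acc ++ skipZeros k l := by
  induction l with
  | nil => intro k acc; cases k <;> simp [skipZeros]
  | cons x xs ih =>
    intro k acc
    cases k with
    | zero => simp [List.foldl_cons, skipZeros, ih]
    | succ k =>
      by_cases hx : x = 0 <;> simp [List.foldl_cons, skipZeros, hx, ih]

theorem thanos_alt_eq (arr : List Int) :
    thanos_alt arr
      = (skipZeros (PySem.List.count arr 0 / 2)
          ((skipOnes (PySem.List.count arr 1 / 2) arr).reverse)).reverse := by
  show ((((arr.foldl _ (_, [])).2.reverse).foldl _ (_, [])).2).reverse = _
  rw [fold2_eq, fold1_eq]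
  simp

theorem count_skipOnes (k : Nat) (l : List Int) :
    (skipOnes k l).count 0 = l.count 0 := by
  fun_induction skipOnes k l with
  | case1 l => rfl
  | case2 k => rfl
  | case3 k x xs hx ih => simp [ih, hx]
  | case4 k x xs hx ih => simp [List.count_cons, ih]

theorem loop1_eq (fuel : Nat) : ∀ (one i : Nat) (num : List Int),
    one + (num.length - i) ≤ fuel →
    thanosLoop1 fuel one i num = num.take i ++ skipOnes one (num.drop i) := by
  induction fuel with
  | zero =>
    intro one i num hf
    have h1 : one = 0 := by omega
    subst h1
    simp [thanosLoop1, skipOnes]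
  | succ fuel ih =>
    intro one i num hf
    rw [thanosLoop1]
    by_cases h1 : one = 0
    · subst h1; simp [skipOnes]
    · rw [if_neg h1]
      rcases hget : PySem.List.pyGet? num (i : Int) with _ | v
      · dsimp only
        rw [PySem.List.pyGet?_eq_none_iff] at hget
        have hge : num.length ≤ i := by
          unfold PySem.Raise.InRange at hget; omega
        have hdrop : num.drop i = ([] : List Int) := List.drop_eq_nil_of_le hge
        have htake : num.take i = num := List.take_of_length_le hge
        rcases one with _ | o
        · omega
        · simp [htake, hdrop, skipOnes]
      · dsimp only
        have hi : i < num.length := by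
          by_contra hge
          simp [PySem.List.pyGet?_natCast, List.getElem?_eq_none (by omega : num.length ≤ i)] at hget
        have hvv : num[i] = v := by
          have := PySem.List.pyGet?_ofNat (xs := num) (n := i) hi
          rw [hget] at this; exact (Option.some.inj this).symm
        have hdl : num.drop i = v :: num.drop (i + 1) := by
          rw [List.drop_eq_getElem_cons hi, hvv]
        by_cases hv : v = 0
        · rw [if_neg (by simpa using hv)]
          rw [ih one (i + 1) num (by omega)]
          rcases one with _ | o
          · omega
          · rw [hdl, skipOnes]
            simp [hv, List.take_add_one, List.getElem?_eq_getElem hi, hvv]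
        · rw [if_pos (by simpa using hv)]
          have hlen : (num.eraseIdx i).length = num.length - 1 := List.length_eraseIdx_of_lt hi
          rw [ih (one - 1) i (num.eraseIdx i) (by rw [hlen]; omega)]
          rw [List.eraseIdx_eq_take_drop_succ]
          have htk : ((num.take i ++ num.drop (i + 1)).take i) = num.take i := by
            rw [List.take_append_of_le_length (by simp [List.length_take]; omega)]
            simp
          have hdr : ((num.take i ++ num.drop (i + 1)).drop i) = num.drop (i + 1) := by
            rw [List.drop_append_of_le_length (by simp [List.length_take]; omega)]
            simp
          rw [htk, hdr]
          have hone : one = (one - 1) + 1 := by omega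
          rw [hdl, hone, skipOnes]
          simp [hv]

theorem loop2_eq (fuel : Nat) : ∀ (zer : Nat) (i : Int) (num : List Int),
    0 ≤ i + 1 → i + 1 ≤ num.length → zer ≤ (num.take (i + 1).toNat).count 0 →
    zer + (i + 1).toNat ≤ fuel →
    thanosLoop2 fuel zer i num
      = (skipZeros zer ((num.take (i + 1).toNat).reverse)).reverse
          ++ num.drop (i + 1).toNat := by
  induction fuel with
  | zero =>
    intro zer i num h0 hle hz hf
    have h1 : zer = 0 := by omega
    have h2 : (i + 1).toNat = 0 := by omega
    rw [thanosLoop2, h2, h1]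
    simp [skipZeros]
  | succ fuel ih =>
    intro zer i num h0 hle hz hf
    rw [thanosLoop2]
    by_cases h1 : zer = 0
    · subst h1; simp [skipZeros]
    · rw [if_neg h1]
      have hne : num.take (i + 1).toNat ≠ [] := by
        intro he; rw [he] at hz; simp at hz; omega
      simp only [ne_eq, List.take_eq_nil_iff, not_or] at hne
      have hi0 : 0 ≤ i := by omega
      have hilt : i < num.length := by omega
      have hiltn : i.toNat < num.length := by omega
      have hn1 : (i + 1).toNat = i.toNat + 1 := by omega
      have hn0 : (i - 1 + 1).toNat = i.toNat := by omega
      rcases hget : PySem.List.pyGet? num i with _ | v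
      · rw [PySem.List.pyGet?_eq_none_iff] at hget
        exact absurd (by unfold PySem.Raise.InRange; omega) hget
      · dsimp only
        have hvv : num[i.toNat] = v := by
          have := PySem.List.pyGet?_eq_some_getElem (xs := num) (i := i) hi0 (by exact_mod_cast hilt)
          rw [hget] at this; exact (Option.some.inj this).symm
        have htake1 : num.take (i.toNat + 1) = num.take i.toNat ++ [v] := by
          rw [List.take_add_one, List.getElem?_eq_getElem hiltn, hvv]; rfl
        have hj : (if i < 0 then i + (num.length : Int) else i).toNat = i.toNat := by
          rw [if_neg (by omega : ¬ i < 0)]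
        by_cases hv : v = 0
        · rw [if_pos hv, hj]
          have hlen : (num.eraseIdx i.toNat).length = num.length - 1 :=
            List.length_eraseIdx_of_lt hiltn
          have hE : num.eraseIdx i.toNat = num.take i.toNat ++ num.drop (i.toNat + 1) :=
            List.eraseIdx_eq_take_drop_succ num i.toNat
          have htk : (num.eraseIdx i.toNat).take i.toNat = num.take i.toNat := by
            rw [hE, List.take_append_of_le_length (by simp [List.length_take]; omega)]
            simp
          have hdr : (num.eraseIdx i.toNat).drop i.toNat = num.drop (i.toNat + 1) := by
            rw [hE, List.drop_append_of_le_length (by simp [List.length_take]; omega)]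
            simp
          have hcnt : zer - 1 ≤ ((num.eraseIdx i.toNat).take i.toNat).count 0 := by
            rw [htk]
            rw [hn1, htake1, hv] at hz
            simp [List.count_append] at hz
            omega
          rw [ih (zer - 1) (i - 1) (num.eraseIdx i.toNat) (by omega)
              (by rw [hlen]; omega) (by rw [hn0]; exact hcnt) (by omega)]
          rw [hn0, hn1, htk, hdr, htake1, hv]
          rcases zer with _ | z
          · omega
          · simp [List.reverse_append, skipZeros]
        · rw [if_neg hv]
          have hcnt : zer ≤ (num.take i.toNat).count 0 := by
            rw [hn1, htake1] at hz
            simp [List.count_append, hv] at hz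
            omega
          have hdropn : num.drop i.toNat = v :: num.drop (i.toNat + 1) := by
            rw [List.drop_eq_getElem_cons hiltn, hvv]
          rw [ih zer (i - 1) num (by omega) (by omega) (by rw [hn0]; exact hcnt) (by omega)]
          rw [hn0, hn1, htake1, hdropn]
          rcases zer with _ | z
          · omega
          · simp [List.reverse_append, skipZeros, hv]

-- ===== VERDICT (by name: the statement is the Claim_ definition above) =====
theorem thanos_spec : Claim_equal_thanos := by
  intro arr _
  unfold Spec_thanos
  rw [thanos_alt_eq]
  show thanosLoop2 _ _ _ _ = _
  have h1 : thanosLoop1 (PySem.List.count arr 1 / 2 + arr.length) (PySem.List.count arr 1 / 2) 0 arr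
      = skipOnes (PySem.List.count arr 1 / 2) arr := by
    simpa using loop1_eq (PySem.List.count arr 1 / 2 + arr.length) (PySem.List.count arr 1 / 2) 0 arr
      (by omega)
  rw [h1]
  set num2 := skipOnes (PySem.List.count arr 1 / 2) arr with hnum2
  have hcnt : num2.count 0 = arr.count 0 := count_skipOnes _ _
  have hc : PySem.List.count arr 0 = arr.count 0 := PySem.List.count_eq arr 0
  have hN : ((num2.length : Int) - 1 + 1).toNat = num2.length := by omega
  have := loop2_eq (PySem.List.count arr 0 / 2 + num2.length)
    (PySem.List.count arr 0 / 2) ((num2.length : Int) - 1) num2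
    (by omega) (by omega)
    (by rw [hN, List.take_length, hcnt, hc]; omega)
    (by omega)
  rw [this, hN, List.take_length, List.drop_length]
  simp
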